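-- pv_equiv track=rewrite | github.com/steveokj/Framer | speech_silence.py | _pad_and_clip
-- ===== SOURCE A (Python) =====
-- from typing import Iterable, List, Optional, Tuple
--
-- def _pad_and_clip(
--     segs: List[Tuple[int, int]], pad_ms: int, total_ms: int
-- ) -> List[Tuple[int, int]]:
--     if not segs:
--         return []
--     padded: List[Tuple[int, int]] = []
--     for s, e in segs:
--         s2 = max(0, s - pad_ms)
--         e2 = min(total_ms, e + pad_ms)
--         padded.append((s2, e2))
--     # merge overlaps after padding
--     padded.sort()
--     out: List[Tuple[int, int]] = []
--     cs, ce = padded[0]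
--     for s, e in padded[1:]:
--         if s <= ce:
--             ce = max(ce, e)
--         else:
--             out.append((cs, ce))
--             cs, ce = s, e
--     out.append((cs, ce))
--     return out
-- ===== SOURCE B (Python) =====
-- from typing import List, Tuple
--
-- def _pad_and_clip(
--     segs: List[Tuple[int, int]], pad_ms: int, total_ms: int
-- ) -> List[Tuple[int, int]]:
--     padded = sorted((max(0, s - pad_ms), min(total_ms, e + pad_ms)) for s, e in segs)
--     # build the merged list back-to-front: walk the sorted intervals in reverse,
--     # keeping a stack `rev` of finished intervals (rev[-1] is the earliest one);
--     # each new interval swallows every stacked interval whose start it reaches.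
--     rev: List[Tuple[int, int]] = []
--     for s, e in reversed(padded):
--         while rev and rev[-1][0] <= e:
--             e = max(e, rev[-1][1])
--             rev.pop()
--         rev.append((s, e))
--     return rev[::-1]
-- ===== Notes on version B (the rewrite author's own statement) =====
-- stated objective: alternative
-- what changed: B builds the merged list back-to-front: it walks the sorted padded intervals in reverse keeping a stack of finished intervals, and each new interval swallows (via an inner while-loop) every stacked interval whose start it reaches, instead of A's forward scan with a (cs,ce) register and trailing append.
import Mathlib
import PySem

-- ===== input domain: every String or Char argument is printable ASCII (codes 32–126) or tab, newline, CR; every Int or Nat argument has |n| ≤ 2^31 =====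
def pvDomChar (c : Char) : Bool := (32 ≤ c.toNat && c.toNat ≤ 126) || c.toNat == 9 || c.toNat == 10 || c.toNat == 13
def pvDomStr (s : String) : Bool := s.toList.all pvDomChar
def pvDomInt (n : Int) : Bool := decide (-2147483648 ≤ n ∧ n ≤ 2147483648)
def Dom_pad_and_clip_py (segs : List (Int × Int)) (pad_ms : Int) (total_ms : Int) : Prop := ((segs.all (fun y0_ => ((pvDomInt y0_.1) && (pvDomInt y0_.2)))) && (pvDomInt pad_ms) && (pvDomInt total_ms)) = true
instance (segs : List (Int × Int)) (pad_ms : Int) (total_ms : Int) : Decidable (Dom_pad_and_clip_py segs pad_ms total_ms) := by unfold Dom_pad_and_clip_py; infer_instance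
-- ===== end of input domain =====

-- B replaces A's forward register scan (carry (cs,ce), compare each start with ce, trailing
-- append, early return) by a back-to-front construction: walk the sorted padded intervals in
-- reverse keeping a stack of finished intervals, each new interval swallowing every stacked
-- interval whose start it reaches (objective: alternative; same cost).

-- ===== PORT A =====
-- A's merge loop state: (out, cs, ce)
def pvStepA (st : List (Int × Int) × Int × Int) (p : Int × Int) : List (Int × Int) × Int × Int :=
  if p.1 ≤ st.2.2 then (st.1, st.2.1, max st.2.2 p.2)
  else (st.1 ++ [(st.2.1, st.2.2)], p.1, p.2)

def pad_and_clip_py (segs : List (Int × Int)) (pad_ms : Int) (total_ms : Int) : List (Int × Int) :=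
  if segs = [] then []
  else
    -- padded.append((max(0, s - pad_ms), min(total_ms, e + pad_ms)))
    let padded := segs.foldl (fun acc p => acc ++ [(max 0 (p.1 - pad_ms), min total_ms (p.2 + pad_ms))]) []
    -- padded.sort(): Python tuple order is lexicographic = toLex on Int × Int
    match PySem.List.sorted padded (fun p => toLex p) with
    | [] => []  -- unreachable: segs ≠ []
    | c :: rest =>
      let st := rest.foldl pvStepA ([], c.1, c.2)
      st.1 ++ [(st.2.1, st.2.2)]

-- ===== PORT B =====
-- Python's stack `rev` (append/pop/peek at the right end) is modelled as a Lean list whose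
-- HEAD is the stack top (rev[-1]); the final `rev[::-1]` is then this list itself.
-- the `while rev and rev[-1][0] <= e:` loop; returns the remaining stack and the grown e
def pvSwallow : List (Int × Int) → Int → List (Int × Int) × Int
  | [], e => ([], e)
  | q :: rest, e => if q.1 ≤ e then pvSwallow rest (max e q.2) else (q :: rest, e)

-- one iteration of B's `for s, e in reversed(padded)` loop body
def pvStepB (rev : List (Int × Int)) (p : Int × Int) : List (Int × Int) :=
  let r := pvSwallow rev p.2
  (p.1, r.2) :: r.1

def pad_and_clip_py_alt (segs : List (Int × Int)) (pad_ms : Int) (total_ms : Int) : List (Int × Int) :=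
  let padded := PySem.List.sorted (segs.map (fun p => (max 0 (p.1 - pad_ms), min total_ms (p.2 + pad_ms)))) (fun p => toLex p)
  padded.reverse.foldl pvStepB []

-- ===== PRECONDITION & SPEC =====
def Spec_pad_and_clip_py (segs : List (Int × Int)) (pad_ms : Int) (total_ms : Int) (out : List (Int × Int)) : Prop := out = pad_and_clip_py_alt segs pad_ms total_ms
instance (segs : List (Int × Int)) (pad_ms : Int) (total_ms : Int) (out : List (Int × Int)) : Decidable (Spec_pad_and_clip_py segs pad_ms total_ms out) := by unfold Spec_pad_and_clip_py; infer_instance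

-- ===== CLAIM (what is proved, stated in full; the proofs are below) =====
def Claim_equal_pad_and_clip_py : Prop := ∀ (segs : List (Int × Int)) (pad_ms : Int) (total_ms : Int), Dom_pad_and_clip_py segs pad_ms total_ms → Spec_pad_and_clip_py segs pad_ms total_ms (pad_and_clip_py segs pad_ms total_ms)

-- ===== LEMMAS AND PROOFS =====

-- A's append-building loop = map
theorem pv_foldl_append_map {α β : Type} (f : α → β) :
    ∀ (l : List α) (acc : List β),
      l.foldl (fun acc p => acc ++ [f p]) acc = acc ++ l.map f := by
  intro l
  induction l with
  | nil => simp
  | cons x t ih => intro acc; simp [List.foldl_cons, ih]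

-- A's merge loop without the `out` accumulator
def pvLoopA : List (Int × Int) → Int × Int → List (Int × Int)
  | [], r => [r]
  | p :: t, r => if p.1 ≤ r.2 then pvLoopA t (r.1, max r.2 p.2) else r :: pvLoopA t p

-- A's foldl with out-accumulator computes out ++ pvLoopA
theorem pv_foldlA_eq_loopA :
    ∀ (t : List (Int × Int)) (out : List (Int × Int)) (cs ce : Int),
      (t.foldl pvStepA (out, cs, ce)).1
        ++ [((t.foldl pvStepA (out, cs, ce)).2.1, (t.foldl pvStepA (out, cs, ce)).2.2)]
        = out ++ pvLoopA t (cs, ce) := by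
  intro t
  induction t with
  | nil => intro out cs ce; simp [pvLoopA]
  | cons p t ih =>
    intro out cs ce
    by_cases hc : p.1 ≤ ce
    · simp only [List.foldl_cons, pvStepA, hc, if_pos, pvLoopA]
      exact ih out cs (max ce p.2)
    · simp only [List.foldl_cons, pvStepA, hc, if_false, pvLoopA]
      rw [ih (out ++ [(cs, ce)]) p.1 p.2]
      simp

-- B's insert written as simple structural recursion
def pvIns (r : Int × Int) : List (Int × Int) → List (Int × Int)
  | [] => [r]
  | q :: m => if q.1 ≤ r.2 then pvIns (r.1, max r.2 q.2) m else r :: q :: m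

theorem pvStepB_eq_pvIns : ∀ (m : List (Int × Int)) (r : Int × Int), pvStepB m r = pvIns r m := by
  intro m
  induction m with
  | nil => intro r; simp [pvStepB, pvSwallow, pvIns]
  | cons q m ih =>
    intro r
    by_cases h : q.1 ≤ r.2
    · simp only [pvStepB, pvSwallow, h, if_pos, pvIns]
      exact ih (r.1, max r.2 q.2)
    · simp [pvStepB, pvSwallow, h, pvIns]

-- composition: inserting r after c is one merge decision followed by a single insert
theorem pvIns_comp : ∀ (m : List (Int × Int)) (r c : Int × Int),
    pvIns r (pvIns c m)
      = if c.1 ≤ r.2 then pvIns (r.1, max r.2 c.2) m else r :: pvIns c m := by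
  intro m
  induction m with
  | nil =>
    intro r c
    by_cases h : c.1 ≤ r.2 <;> simp [pvIns, h]
  | cons q m ih =>
    intro r c
    by_cases hqc : q.1 ≤ c.2
    · -- pvIns c (q::m) = pvIns (c.1, max c.2 q.2) m
      simp only [pvIns, hqc, if_pos]
      rw [ih r (c.1, max c.2 q.2)]
      by_cases hcr : c.1 ≤ r.2
      · simp only [hcr, if_pos,
          show q.1 ≤ max r.2 c.2 from le_trans hqc (le_max_right _ _)]
        have : max r.2 (max c.2 q.2) = max (max r.2 c.2) q.2 := (max_assoc _ _ _).symm
        rw [this]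
      · simp [hcr]
    · -- pvIns c (q::m) = c :: q :: m: both sides normalise to the same nested ifs
      simp [pvIns, hqc]

-- key lemma: folding B's insert from the right computes A's register loop
theorem pv_foldr_eq_loopA : ∀ (t : List (Int × Int)) (r : Int × Int),
    pvIns r (t.foldr pvIns []) = pvLoopA t r := by
  intro t
  induction t with
  | nil => intro r; simp [pvIns, pvLoopA]
  | cons c t ih =>
    intro r
    rw [List.foldr_cons, pvIns_comp, pvLoopA]
    by_cases h : c.1 ≤ r.2
    · simp only [h, if_pos, ih]
    · simp only [h, ite_false, ih]

theorem pad_and_clip_py_eq (segs : List (Int × Int)) (pad_ms total_ms : Int) :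
    pad_and_clip_py segs pad_ms total_ms = pad_and_clip_py_alt segs pad_ms total_ms := by
  unfold pad_and_clip_py pad_and_clip_py_alt
  by_cases hs : segs = []
  · subst hs; simp [PySem.List.sorted]
  · simp only [hs, if_false]
    rw [pv_foldl_append_map, List.nil_append]
    have hfold : ∀ (l : List (Int × Int)),
        l.reverse.foldl pvStepB [] = l.foldr pvIns [] := by
      intro l
      rw [List.foldl_reverse]
      rw [show (fun (x : Int × Int) (y : List (Int × Int)) => pvStepB y x) = pvIns from
        funext fun x => funext fun y => pvStepB_eq_pvIns y x]
    rw [hfold]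
    cases h : PySem.List.sorted (segs.map (fun p => (max 0 (p.1 - pad_ms), min total_ms (p.2 + pad_ms)))) (fun p => toLex p) with
    | nil => simp
    | cons c rest =>
      dsimp only
      rw [List.foldr_cons, pv_foldr_eq_loopA, pv_foldlA_eq_loopA, List.nil_append]

-- ===== VERDICT (by name: the statement is the Claim_ definition above) =====
theorem pad_and_clip_py_spec : Claim_equal_pad_and_clip_py := by
  intro segs pad_ms total_ms _
  unfold Spec_pad_and_clip_py
  exact pad_and_clip_py_eq segs pad_ms total_ms
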